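-- pv_equiv track=rewrite | github.com/XinyuLyu/Mutual-Correlation-Attentive-Factors-in-Dyadic-Fusion-Networks-for-Speech-Emotion-Recognition | ACMM/fusion_context_regression.py | compute_same_label
-- ===== SOURCE A (Python) =====
-- def compute_same_label(label):
--     flag = 0
--     count = 0
--     for val in label:
--         if val > flag:
--             flag = val
--             count = 0
--         elif val == flag:
--             count += 1
--     return count
-- ===== SOURCE B (Python) =====
-- def compute_same_label(label):
--     seq = [0] + list(label)
--     m = max(seq)
--     return seq.count(m) - 1
-- ===== Notes on version B (the rewrite author's own statement) =====
-- stated objective: simpler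
-- what changed: Replaces A's stateful running-max-with-reset loop by prepending a 0 sentinel, taking the global max, and counting its occurrences minus one (the occurrence that established the max).
import Mathlib
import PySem

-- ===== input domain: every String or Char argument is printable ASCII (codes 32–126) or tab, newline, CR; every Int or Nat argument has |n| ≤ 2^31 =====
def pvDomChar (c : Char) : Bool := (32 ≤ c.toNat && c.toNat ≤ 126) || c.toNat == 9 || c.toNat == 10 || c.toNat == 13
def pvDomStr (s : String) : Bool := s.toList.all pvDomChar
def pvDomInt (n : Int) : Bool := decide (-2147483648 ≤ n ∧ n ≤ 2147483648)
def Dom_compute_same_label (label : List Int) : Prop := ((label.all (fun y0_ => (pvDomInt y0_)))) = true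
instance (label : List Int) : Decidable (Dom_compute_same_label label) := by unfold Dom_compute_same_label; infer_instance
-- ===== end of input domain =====

-- B replaces A's running-max-with-reset loop by a global max over [0]+label and a count of its
-- occurrences minus one (objective: simpler).

-- ===== PORT A =====
def compute_same_label (label : List Int) : Int :=
  (label.foldl
    (fun (s : Int × Int) val =>
      if val > s.1 then (val, 0)
      else if val == s.1 then (s.1, s.2 + 1)
      else s)
    (0, 0)).2

-- ===== PORT B =====
def compute_same_label_alt (label : List Int) : Int :=
  let seq : List Int := 0 :: label
  match PySem.List.max? seq (fun x => x) with
  | some m => (PySem.List.count seq m : Int) - 1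
  | none => 0   -- unreachable: seq is nonempty (Python max never raises here)

-- ===== PRECONDITION & SPEC =====
def Spec_compute_same_label (label : List Int) (out : Int) : Prop := out = compute_same_label_alt label
instance (label : List Int) (out : Int) : Decidable (Spec_compute_same_label label out) := by unfold Spec_compute_same_label; infer_instance

-- ===== CLAIM (what is proved, stated in full; the proofs are below) =====
def Claim_equal_compute_same_label : Prop := ∀ (label : List Int), Dom_compute_same_label label → Spec_compute_same_label label (compute_same_label label)

-- ===== LEMMAS AND PROOFS =====

theorem pvLe_foldl_max (l : List Int) (a : Int) : a ≤ l.foldl max a := by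
  induction l generalizing a with
  | nil => simp
  | cons v vs ih => exact le_trans (le_max_left a v) (ih (max a v))

-- characterisation of A's loop: the second component of the fold state
theorem pvLoopA_eq (l : List Int) : ∀ flag count : Int,
    (l.foldl
      (fun (s : Int × Int) val =>
        if val > s.1 then (val, 0)
        else if val == s.1 then (s.1, s.2 + 1)
        else s)
      (flag, count)).2 =
    if l.foldl max flag = flag then count + (l.count flag : Int)
    else (l.count (l.foldl max flag) : Int) - 1 := by
  induction l with
  | nil => intro flag count; simp
  | cons v vs ih =>
    intro flag count
    by_cases hv : v > flag
    · have hmax : max flag v = v := max_eq_right (le_of_lt hv)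
      simp only [List.foldl_cons, if_pos hv, hmax]
      rw [ih v 0]
      have hM : v ≤ vs.foldl max v := pvLe_foldl_max vs v
      have hMne : vs.foldl max v ≠ flag := by omega
      rw [if_neg hMne]
      by_cases hMv : vs.foldl max v = v
      · rw [if_pos hMv, hMv, List.count_cons_self]
        push_cast; ring
      · rw [if_neg hMv, List.count_cons_of_ne]
        omega
    · have hmax : max flag v = flag := max_eq_left (by omega)
      by_cases he : v = flag
      · have : (v == flag) = true := by simp [he]
        simp only [List.foldl_cons, if_neg hv, this, if_pos, hmax]
        rw [ih flag (count + 1)]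
        by_cases hM : vs.foldl max flag = flag
        · rw [if_pos hM, if_pos hM, he, List.count_cons_self]
          push_cast; ring
        · have hgt : flag < vs.foldl max flag :=
            lt_of_le_of_ne (pvLe_foldl_max vs flag) (Ne.symm hM)
          rw [if_neg hM, if_neg hM, List.count_cons_of_ne]
          omega
      · have : (v == flag) = false := by simp [he]
        simp only [List.foldl_cons, if_neg hv, this, Bool.false_eq_true, if_false, hmax]
        rw [ih flag count]
        by_cases hM : vs.foldl max flag = flag
        · rw [if_pos hM, if_pos hM, List.count_cons_of_ne]
          exact fun h => he h
        · have hgt : flag < vs.foldl max flag :=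
            lt_of_le_of_ne (pvLe_foldl_max vs flag) (Ne.symm hM)
          rw [if_neg hM, if_neg hM, List.count_cons_of_ne]
          omega

-- ===== VERDICT (by name: the statement is the Claim_ definition above) =====
theorem compute_same_label_spec : Claim_equal_compute_same_label := by
  intro label _
  unfold Spec_compute_same_label compute_same_label compute_same_label_alt
  rw [pvLoopA_eq label 0 0]
  simp only [PySem.List.max?_id_cons, PySem.List.count_eq]
  by_cases hM : label.foldl max 0 = 0
  · rw [if_pos hM, hM, List.count_cons_self]
    push_cast; ring
  · have hgt : (0 : Int) < label.foldl max 0 :=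
      lt_of_le_of_ne (pvLe_foldl_max label 0) (Ne.symm hM)
    rw [if_neg hM, List.count_cons_of_ne (by omega)]
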